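-- pv_equiv track=rewrite | github.com/Vergil0327/leetcode-history | UnionFind/1319. Number of Operations to Make Network Connected/solution.py | makeConnected
-- ===== SOURCE A (Python) =====
-- from typing import List
--
-- def makeConnected(n: int, connections: List[List[int]]) -> int:
--     if len(connections) < n-1: return -1
--
--     parent = list(range(n))
--     rank = [1] * n
--
--     def find(x):
--         if parent[x] != x:
--             parent[x] = find(parent[x])
--         return parent[x]
--
--     for u, v in connections:
--         pu, pv = find(u), find(v)
--         if pu == pv: continue
--
--         if rank[pu] <= rank[pv]:
--             parent[pv] = pu
--             rank[pu] += rank[pv]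
--         else:
--             parent[pu] = pv
--             rank[pv] += rank[pv]
--
--     connectedComponents = set()
--     for i in range(n):
--         connectedComponents.add(find(i))
--     return len(connectedComponents)-1
-- ===== SOURCE B (Python) =====
-- from typing import List
--
-- def makeConnected(n: int, connections: List[List[int]]) -> int:
--     if len(connections) < n - 1:
--         return -1
--     comp = list(range(n))
--     for u, v in connections:
--         cu, cv = comp[u], comp[v]
--         if cu != cv:
--             for i in range(n):
--                 if comp[i] == cv:
--                     comp[i] = cu
--     return len(set(comp)) - 1
-- ===== Notes on version B (the rewrite author's own statement) =====
-- stated objective: simpler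
-- what changed: Replaced the union-find structure (recursive find with path compression plus a rank table) by direct component relabelling: an array of component labels where each connecting edge repaints every node carrying one endpoint's label with the other's, and the answer is the number of distinct labels minus one.
import Mathlib
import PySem

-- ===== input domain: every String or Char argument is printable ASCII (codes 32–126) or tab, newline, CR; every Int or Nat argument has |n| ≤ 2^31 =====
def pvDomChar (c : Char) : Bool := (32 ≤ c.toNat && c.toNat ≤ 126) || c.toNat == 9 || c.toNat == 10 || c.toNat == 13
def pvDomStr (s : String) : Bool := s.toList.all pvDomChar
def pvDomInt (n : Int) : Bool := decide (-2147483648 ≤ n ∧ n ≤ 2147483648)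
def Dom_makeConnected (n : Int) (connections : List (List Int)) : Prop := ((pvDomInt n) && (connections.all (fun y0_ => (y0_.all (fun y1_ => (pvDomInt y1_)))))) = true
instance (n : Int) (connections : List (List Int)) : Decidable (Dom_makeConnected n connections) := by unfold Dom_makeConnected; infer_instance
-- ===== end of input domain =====

-- B replaces A's union-find (recursive find with path compression + rank table) by direct
-- component relabelling over a label array; structurally different, not claimed faster.

-- ===== PORT A =====
-- recursive `find` with path compression; the fuel argument (always parent.length + 1,
-- enough for any acyclic parent forest, incl. one negative start index) only makes the
-- Python recursion structurally total.
def findA : Nat → List Int → Int → Int × List Int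
  | 0, p, _ => (0, p)   -- never reached under Pre_
  | f + 1, p, x =>
    if PySem.List.pyGetD p x 0 ≠ x then
      let res := findA f p (PySem.List.pyGetD p x 0)
      (res.1, PySem.List.pySetD res.2 x res.1)   -- parent[x] = find(parent[x]); return parent[x]
    else (x, p)

-- body of `for u, v in connections: ...` (state: parent, rank)
def stepA (st : List Int × List Int) (e : List Int) : List Int × List Int :=
  match e with
  | [u, v] =>
    let fu := findA (st.1.length + 1) st.1 u
    let pu := fu.1
    let fv := findA (fu.2.length + 1) fu.2 v
    let pv := fv.1
    let p2 := fv.2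
    let rk := st.2
    if pu = pv then (p2, rk)
    else if PySem.List.pyGetD rk pu 0 ≤ PySem.List.pyGetD rk pv 0 then
      (PySem.List.pySetD p2 pv pu,
       PySem.List.pySetD rk pu (PySem.List.pyGetD rk pu 0 + PySem.List.pyGetD rk pv 0))
    else
      (PySem.List.pySetD p2 pu pv,
       PySem.List.pySetD rk pv (PySem.List.pyGetD rk pv 0 + PySem.List.pyGetD rk pv 0))
  | _ => st   -- unreachable under Pre_ (Python raises on a non-pair)

-- body of `for i in range(n): connectedComponents.add(find(i))`
def countStep (acc : PySem.Set Int × List Int) (i : Int) : PySem.Set Int × List Int :=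
  let fr := findA (acc.2.length + 1) acc.2 i
  (PySem.Set.add acc.1 fr.1, fr.2)

def makeConnected (n : Int) (connections : List (List Int)) : Int :=
  if (connections.length : Int) < n - 1 then -1
  else
    let parent := PySem.List.pyRange 0 n
    let rank : List Int := List.replicate n.toNat 1
    let st := connections.foldl stepA (parent, rank)
    let cnt := (PySem.List.pyRange 0 n).foldl countStep (PySem.Set.empty, st.1)
    PySem.Set.len cnt.1 - 1

-- ===== PORT B =====
-- body of `for u, v in connections: ...` (state: comp)
def stepB (n : Int) (comp : List Int) (e : List Int) : List Int :=
  match e with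
  | [u, v] =>
    let cu := PySem.List.pyGetD comp u 0
    let cv := PySem.List.pyGetD comp v 0
    if cu ≠ cv then
      (PySem.List.pyRange 0 n).foldl (fun c i =>
        if PySem.List.pyGetD c i 0 = cv then PySem.List.pySetD c i cu else c) comp
    else comp
  | _ => comp   -- unreachable under Pre_ (Python raises on a non-pair)

def makeConnected_alt (n : Int) (connections : List (List Int)) : Int :=
  if (connections.length : Int) < n - 1 then -1
  else
    let comp := connections.foldl (stepB n) (PySem.List.pyRange 0 n)
    PySem.Set.len (PySem.Set.ofList comp) - 1

-- ===== PRECONDITION & SPEC =====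
-- Pre_ is exactly where the Python A returns: either the early `-1` guard fires before the
-- loop, or every connection is a pair whose endpoints are valid (possibly negative) Python
-- indices into the n-element parent list; otherwise A raises ValueError/IndexError.
def Pre_makeConnected (n : Int) (connections : List (List Int)) : Prop :=
  (connections.length : Int) < n - 1 ∨
    ∀ e ∈ connections, e.length = 2 ∧ ∀ x ∈ e, -n ≤ x ∧ x < n
instance (n : Int) (connections : List (List Int)) : Decidable (Pre_makeConnected n connections) := by
  unfold Pre_makeConnected; infer_instance

def pvWitness_makeConnected : Int × List (List Int) := (4, [[0, 1], [1, 2], [0, 3]])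

def Spec_makeConnected (n : Int) (connections : List (List Int)) (out : Int) : Prop := out = makeConnected_alt n connections
instance (n : Int) (connections : List (List Int)) (out : Int) : Decidable (Spec_makeConnected n connections out) := by unfold Spec_makeConnected; infer_instance

-- ===== CLAIM (what is proved, stated in full; the proofs are below) =====
def Claim_equal_makeConnected : Prop := ∀ (n : Int) (connections : List (List Int)), Dom_makeConnected n connections → Pre_makeConnected n connections → Spec_makeConnected n connections (makeConnected n connections)

-- ===== LEMMAS AND PROOFS =====

-- ---- abstract root function for a parent array (fuelled) ----
def rootA : Nat → List Int → Int → Option Int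
  | 0, _, _ => none
  | f + 1, p, x =>
    if PySem.List.pyGetD p x 0 = x then some x else rootA f p (PySem.List.pyGetD p x 0)

-- entries of p are in range
def Rng (p : List Int) : Prop :=
  ∀ i : Int, 0 ≤ i → i < (p.length : Int) →
    0 ≤ PySem.List.pyGetD p i 0 ∧ PySem.List.pyGetD p i 0 < (p.length : Int)

-- every node reaches a root within fuel p.length + 1
def Som (p : List Int) : Prop :=
  ∀ i : Int, 0 ≤ i → i < (p.length : Int) → (rootA (p.length + 1) p i).isSome

-- the canonical representative of x's component
def rt (p : List Int) (x : Int) : Int := (rootA (p.length + 1) p x).getD 0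

lemma rootA_mono : ∀ (f g : Nat) (p : List Int) (x r : Int),
    rootA f p x = some r → f ≤ g → rootA g p x = some r := by
  intro f
  induction f with
  | zero => intro g p x r h; simp [rootA] at h
  | succ f ih =>
    intro g p x r h hg
    obtain ⟨g', rfl⟩ : ∃ g', g = g' + 1 := ⟨g - 1, by omega⟩
    simp only [rootA] at h ⊢
    split at h
    · simpa [*] using h
    · simp only [*, if_neg (by assumption)]
      exact ih g' p _ r h (by omega)

lemma rootA_unique {f g : Nat} {p : List Int} {x r s : Int}
    (h1 : rootA f p x = some r) (h2 : rootA g p x = some s) : r = s := by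
  have := rootA_mono f (f + g) p x r h1 (by omega)
  have := rootA_mono g (f + g) p x s h2 (by omega)
  simp_all

lemma rootA_root : ∀ (f : Nat) (p : List Int) (x r : Int),
    rootA f p x = some r → PySem.List.pyGetD p r 0 = r := by
  intro f
  induction f with
  | zero => intro p x r h; simp [rootA] at h
  | succ f ih =>
    intro p x r h
    simp only [rootA] at h
    split at h
    · obtain rfl : x = r := by simpa using h
      assumption
    · exact ih p _ r h

lemma rootA_range : ∀ (f : Nat) (p : List Int) (x r : Int), Rng p →
    0 ≤ x → x < (p.length : Int) → rootA f p x = some r →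
    0 ≤ r ∧ r < (p.length : Int) := by
  intro f
  induction f with
  | zero => intro p x r _ _ _ h; simp [rootA] at h
  | succ f ih =>
    intro p x r hR hx0 hxL h
    simp only [rootA] at h
    split at h
    · obtain rfl : x = r := by simpa using h
      exact ⟨hx0, hxL⟩
    · exact ih p _ r hR (hR x hx0 hxL).1 (hR x hx0 hxL).2 h

lemma rootA_self {f : Nat} {p : List Int} {x : Int}
    (h : PySem.List.pyGetD p x 0 = x) (hf : 1 ≤ f) : rootA f p x = some x := by
  obtain ⟨f', rfl⟩ : ∃ f', f = f' + 1 := ⟨f - 1, by omega⟩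
  simp [rootA, h]

lemma pg_set {p : List Int} {x : Int} (v : Int) {m : Int}
    (hx0 : 0 ≤ x) (hxL : x < (p.length : Int)) (hm : 0 ≤ m) :
    PySem.List.pyGetD (PySem.List.pySetD p x v) m 0 =
      if m = x then v else PySem.List.pyGetD p m 0 := by
  have hx : x = ((x.toNat : Nat) : Int) := by omega
  have hm' : m = ((m.toNat : Nat) : Int) := by omega
  rw [hx, hm', PySem.List.pyGetD_pySetD_natCast _ _ _ _ _ (by omega)]
  rw [← hm', ← hx]
  by_cases hmx : m = x
  · rw [if_pos (show m.toNat = x.toNat by omega), if_pos hmx]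
  · rw [if_neg (show ¬ m.toNat = x.toNat by omega), if_neg hmx]

-- ---- visited chain, to bound the fuel a root computation needs ----
def chainA : Nat → List Int → Int → List Int
  | 0, _, _ => []
  | f + 1, p, x =>
    if PySem.List.pyGetD p x 0 = x then [x] else x :: chainA f p (PySem.List.pyGetD p x 0)

lemma chain_sound : ∀ (f : Nat) (p : List Int) (x r : Int),
    rootA f p x = some r → rootA (chainA f p x).length p x = some r := by
  intro f
  induction f with
  | zero => intro p x r h; simp [rootA] at h
  | succ f ih =>
    intro p x r h
    simp only [rootA] at h
    by_cases hx : PySem.List.pyGetD p x 0 = x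
    · simp only [chainA, if_pos hx]
      simpa [rootA, hx] using h
    · rw [if_neg hx] at h
      simp only [chainA, if_neg hx, List.length_cons, rootA, if_neg hx]
      exact ih p _ r h

lemma chain_fuel_irrel : ∀ (f g : Nat) (p : List Int) (x r : Int),
    rootA f p x = some r → f ≤ g → chainA g p x = chainA f p x := by
  intro f
  induction f with
  | zero => intro g p x r h; simp [rootA] at h
  | succ f ih =>
    intro g p x r h hg
    obtain ⟨g', rfl⟩ : ∃ g', g = g' + 1 := ⟨g - 1, by omega⟩
    simp only [rootA] at h
    by_cases hx : PySem.List.pyGetD p x 0 = x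
    · simp [chainA, hx]
    · rw [if_neg hx] at h
      simp only [chainA, if_neg hx]
      rw [ih g' p _ r h (by omega)]

lemma chain_mem_root : ∀ (f : Nat) (p : List Int) (x y r : Int),
    rootA f p x = some r → y ∈ chainA f p x → rootA f p y = some r := by
  intro f
  induction f with
  | zero => intro p x y r h; simp [rootA] at h
  | succ f ih =>
    intro p x y r h hy
    by_cases hx : PySem.List.pyGetD p x 0 = x
    · simp only [chainA, if_pos hx, List.mem_singleton] at hy
      subst hy; exact h
    · simp only [chainA, if_neg hx, List.mem_cons] at hy
      simp only [rootA, if_neg hx] at h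
      rcases hy with rfl | hy
      · simp only [rootA, if_neg hx]; exact h
      · exact rootA_mono f (f + 1) p y r (ih p _ y r h hy) (by omega)

lemma chain_len_le : ∀ (f : Nat) (p : List Int) (x y r : Int),
    rootA f p x = some r → y ∈ chainA f p x →
    (chainA f p y).length ≤ (chainA f p x).length := by
  intro f
  induction f with
  | zero => intro p x y r h; simp [rootA] at h
  | succ f ih =>
    intro p x y r h hy
    by_cases hx : PySem.List.pyGetD p x 0 = x
    · simp only [chainA, if_pos hx, List.mem_singleton] at hy
      subst hy; omega
    · simp only [chainA, if_neg hx, List.mem_cons] at hy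
      simp only [rootA, if_neg hx] at h
      rcases hy with rfl | hy
      · exact le_refl _
      · have h1 := ih p _ y r h hy
        have hyr : rootA f p y = some r := chain_mem_root f p _ y r h hy
        have h2 : chainA (f + 1) p y = chainA f p y := chain_fuel_irrel f (f + 1) p y r hyr (by omega)
        rw [h2]
        simp only [chainA, if_neg hx, List.length_cons]
        omega

lemma chain_nodup : ∀ (f : Nat) (p : List Int) (x r : Int),
    rootA f p x = some r → (chainA f p x).Nodup := by
  intro f
  induction f with
  | zero => intro p x r h; simp [rootA] at h
  | succ f ih =>
    intro p x r h
    by_cases hx : PySem.List.pyGetD p x 0 = x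
    · simp [chainA, hx]
    · simp only [rootA, if_neg hx] at h
      simp only [chainA, if_neg hx, List.nodup_cons]
      refine ⟨?_, ih p _ r h⟩
      intro hmem
      have hxr : rootA f p x = some r := chain_mem_root f p _ x r h hmem
      have h1 := chain_len_le f p _ x r h hmem
      have h2 : chainA (f + 1) p x = chainA f p x :=
        chain_fuel_irrel f (f + 1) p x r hxr (by omega)
      have h3 : chainA (f + 1) p x = x :: chainA f p (PySem.List.pyGetD p x 0) := by
        simp [chainA, hx]
      rw [h2] at h3
      have := congrArg List.length h3
      simp only [List.length_cons] at this
      omega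

lemma chain_subset : ∀ (f : Nat) (p : List Int) (x y : Int), Rng p →
    0 ≤ x → x < (p.length : Int) → y ∈ chainA f p x →
    0 ≤ y ∧ y < (p.length : Int) := by
  intro f
  induction f with
  | zero => intro p x y _ _ _ h; simp [chainA] at h
  | succ f ih =>
    intro p x y hR hx0 hxL hy
    by_cases hx : PySem.List.pyGetD p x 0 = x
    · simp only [chainA, if_pos hx, List.mem_singleton] at hy
      subst hy; exact ⟨hx0, hxL⟩
    · simp only [chainA, if_neg hx, List.mem_cons] at hy
      rcases hy with rfl | hy
      · exact ⟨hx0, hxL⟩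
      · exact ih p _ y hR (hR x hx0 hxL).1 (hR x hx0 hxL).2 hy

-- within fuel p.length the root is reached (for in-range x)
lemma rootA_fuel_len (f : Nat) (p : List Int) (x r : Int) (hR : Rng p)
    (hx0 : 0 ≤ x) (hxL : x < (p.length : Int)) (h : rootA f p x = some r) :
    rootA p.length p x = some r := by
  have hs := chain_sound f p x r h
  have hnd := chain_nodup f p x r h
  have hsub : chainA f p x ⊆ PySem.List.pyRange 0 (p.length : Int) := by
    intro y hy
    have := chain_subset f p x y hR hx0 hxL hy
    rw [PySem.List.mem_pyRange_one]; omega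
  have hlen : (chainA f p x).length ≤ p.length := by
    calc (chainA f p x).length = (chainA f p x).toFinset.card :=
          (List.toFinset_card_of_nodup hnd).symm
      _ ≤ (PySem.List.pyRange 0 (p.length : Int)).toFinset.card :=
          Finset.card_le_card (by intro z hz; simp only [List.mem_toFinset] at hz ⊢; exact hsub hz)
      _ ≤ (PySem.List.pyRange 0 (p.length : Int)).length := List.toFinset_card_le _
      _ = p.length := by rw [PySem.List.length_pyRange_one]; omega
  exact rootA_mono _ _ p x r hs hlen

-- ---- path compression: pointing x straight at its root changes no root ----
lemma setroot_preserves (p : List Int) (x r : Int) (hR : Rng p)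
    (hx0 : 0 ≤ x) (hxL : x < (p.length : Int))
    (hxr : rootA (p.length + 1) p x = some r) :
    ∀ (g : Nat) (i s : Int), 0 ≤ i → i < (p.length : Int) →
      rootA g p i = some s → rootA g (PySem.List.pySetD p x r) i = some s := by
  have hroot : PySem.List.pyGetD p r 0 = r := rootA_root _ p x r hxr
  have hr0 : 0 ≤ r := (rootA_range _ p x r hR hx0 hxL hxr).1
  intro g
  induction g with
  | zero => intro i s _ _ h; simp [rootA] at h
  | succ g ih =>
    intro i s hi0 hiL h
    by_cases hix : i = x
    · subst hix
      have hs : s = r := rootA_unique h hxr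
      subst hs
      by_cases hri : s = i
      · -- x already a root: the write is s at i with s = i
        have hp'i : PySem.List.pyGetD (PySem.List.pySetD p i s) i 0 = s := by
          rw [pg_set s hx0 hxL hi0]; simp
        rw [hri] at hp'i
        rw [hri]
        exact rootA_self hp'i (by omega)
      · -- p'[i] = s, s ≠ i, and s stays a root
        have hg1 : 1 ≤ g := by
          simp only [rootA] at h
          by_cases hpi : PySem.List.pyGetD p i 0 = i
          · rw [if_pos hpi] at h
            exact absurd (Option.some.inj h) (fun he => hri (he.symm))
          · rw [if_neg hpi] at h
            cases g with
            | zero => simp [rootA] at h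
            | succ g' => omega
        have hp'i : PySem.List.pyGetD (PySem.List.pySetD p i s) i 0 = s := by
          rw [pg_set s hx0 hxL hi0]; simp
        have hp'r : PySem.List.pyGetD (PySem.List.pySetD p i s) s 0 = s := by
          rw [pg_set s hx0 hxL hr0, if_neg hri]
          exact hroot
        have hstep : rootA (g + 1) (PySem.List.pySetD p i s) i = rootA g (PySem.List.pySetD p i s) s := by
          simp only [rootA, hp'i, if_neg hri]
        rw [hstep]
        exact rootA_self hp'r hg1
    · have hp'i : PySem.List.pyGetD (PySem.List.pySetD p x r) i 0 = PySem.List.pyGetD p i 0 := by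
        rw [pg_set r hx0 hxL hi0, if_neg hix]
      simp only [rootA, hp'i]
      simp only [rootA] at h
      by_cases hpi : PySem.List.pyGetD p i 0 = i
      · rw [if_pos hpi] at h ⊢; exact h
      · rw [if_neg hpi] at h ⊢
        exact ih (PySem.List.pyGetD p i 0) s (hR i hi0 hiL).1 (hR i hi0 hiL).2 h

lemma find_go : ∀ (f : Nat) (p : List Int) (x r : Int), Rng p →
    0 ≤ x → x < (p.length : Int) → rootA f p x = some r →
    (findA f p x).1 = r ∧ (findA f p x).2.length = p.length ∧ Rng (findA f p x).2 ∧
    (∀ (g : Nat) (i s : Int), 0 ≤ i → i < (p.length : Int) →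
      rootA g p i = some s → rootA g (findA f p x).2 i = some s) := by
  intro f
  induction f with
  | zero => intro p x r _ _ _ h; simp [rootA] at h
  | succ f ih =>
    intro p x r hR hx0 hxL h
    by_cases hpx : PySem.List.pyGetD p x 0 = x
    · simp only [rootA, if_pos hpx] at h
      obtain rfl : x = r := by simpa using h
      simp only [findA, if_neg (not_not_intro hpx)]
      exact ⟨trivial, trivial, hR, fun g i s _ _ hh => hh⟩
    · simp only [rootA, if_neg hpx] at h
      obtain ⟨hv, hlen, hRq, hpres⟩ :=
        ih p (PySem.List.pyGetD p x 0) r hR (hR x hx0 hxL).1 (hR x hx0 hxL).2 h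
      simp only [findA, if_pos hpx]
      set q1 := (findA f p (PySem.List.pyGetD p x 0)).2 with hq1
      have hxr_p : rootA (p.length + 1) p x = some r := by
        have : rootA (f + 1) p x = some r := by simp only [rootA, if_neg hpx]; exact h
        exact rootA_mono _ _ p x r (rootA_fuel_len (f+1) p x r hR hx0 hxL this) (by omega)
      have hxr_q1 : rootA (q1.length + 1) q1 x = some r := by
        rw [hlen]; exact hpres (p.length + 1) x r hx0 hxL hxr_p
      have hr_rng : 0 ≤ r ∧ r < (p.length : Int) := rootA_range _ p x r hR hx0 hxL hxr_p
      have hRq1 : Rng q1 := hRq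
      have hsp := setroot_preserves q1 x r hRq1 hx0 (by rw [hlen]; exact hxL) hxr_q1
      refine ⟨by simp [hv], ?_, ?_, ?_⟩
      · simp [PySem.List.length_pySetD, hlen, hv]
      · -- Rng of the compressed parent
        intro j hj0 hjL
        simp only [PySem.List.length_pySetD] at hjL ⊢
        rw [hv]
        rw [pg_set r hx0 (by rw [hlen]; exact hxL) hj0]
        split
        · rw [hlen]; exact hr_rng
        · exact hRq1 j hj0 hjL
      · intro g i s hi0 hiL hs
        rw [hv]
        exact hsp g i s hi0 (by rw [hlen]; exact hiL) (hpres g i s hi0 hiL hs)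

-- ---- union: linking root b under root a remaps exactly the b-block ----
lemma union_keep (p : List Int) (a b : Int) (hR : Rng p)
    (hb0 : 0 ≤ b) (hbL : b < (p.length : Int)) (hrb : PySem.List.pyGetD p b 0 = b) :
    ∀ (g : Nat) (i s : Int), 0 ≤ i → i < (p.length : Int) →
      rootA g p i = some s → s ≠ b → rootA g (PySem.List.pySetD p b a) i = some s := by
  intro g
  induction g with
  | zero => intro i s _ _ h; simp [rootA] at h
  | succ g ih =>
    intro i s hi0 hiL h hsb
    have hib : i ≠ b := by
      intro he; subst he
      exact hsb (rootA_unique h (rootA_self (f := 1) hrb (by omega)))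
    have hp'i : PySem.List.pyGetD (PySem.List.pySetD p b a) i 0 = PySem.List.pyGetD p i 0 := by
      rw [pg_set a hb0 hbL hi0, if_neg hib]
    simp only [rootA, hp'i]
    simp only [rootA] at h
    by_cases hpi : PySem.List.pyGetD p i 0 = i
    · rw [if_pos hpi] at h ⊢; exact h
    · rw [if_neg hpi] at h ⊢
      exact ih (PySem.List.pyGetD p i 0) s (hR i hi0 hiL).1 (hR i hi0 hiL).2 h hsb

lemma union_move (p : List Int) (a b : Int) (hR : Rng p)
    (ha0 : 0 ≤ a) (haL : a < (p.length : Int)) (hb0 : 0 ≤ b) (hbL : b < (p.length : Int))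
    (hra : PySem.List.pyGetD p a 0 = a) (hab : a ≠ b) :
    ∀ (g : Nat) (i : Int), 0 ≤ i → i < (p.length : Int) →
      rootA g p i = some b → rootA (g + 1) (PySem.List.pySetD p b a) i = some a := by
  intro g
  induction g with
  | zero => intro i _ _ h; simp [rootA] at h
  | succ g ih =>
    intro i hi0 hiL h
    by_cases hib : i = b
    · subst hib
      have hg1 : 1 ≤ g + 1 := by omega
      have hp'i : PySem.List.pyGetD (PySem.List.pySetD p i a) i 0 = a := by
        rw [pg_set a hb0 hbL hi0]; simp
      have hp'a : PySem.List.pyGetD (PySem.List.pySetD p i a) a 0 = a := by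
        rw [pg_set a hb0 hbL ha0, if_neg hab]
        exact hra
      have hstep : rootA (g + 1 + 1) (PySem.List.pySetD p i a) i
          = rootA (g + 1) (PySem.List.pySetD p i a) a := by
        simp only [rootA, hp'i, if_neg hab]
      rw [hstep]
      exact rootA_self hp'a (by omega)
    · have hp'i : PySem.List.pyGetD (PySem.List.pySetD p b a) i 0 = PySem.List.pyGetD p i 0 := by
        rw [pg_set a hb0 hbL hi0, if_neg hib]
      simp only [rootA] at h
      by_cases hpi : PySem.List.pyGetD p i 0 = i
      · rw [if_pos hpi] at h
        exact absurd (Option.some.inj h) hib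
      · rw [if_neg hpi] at h
        have hrec := ih (PySem.List.pyGetD p i 0) (hR i hi0 hiL).1 (hR i hi0 hiL).2 h
        have hstep : rootA (g + 1 + 1) (PySem.List.pySetD p b a) i
            = rootA (g + 1) (PySem.List.pySetD p b a) (PySem.List.pyGetD p i 0) := by
          simp only [rootA, hp'i, if_neg hpi]
        rw [hstep]
        exact hrec

-- ---- Python negative-index aliasing: xs[x] = xs[x + len(xs)] for -len ≤ x < 0 ----
lemma pyIdx_alias (n : Nat) (x : Int) (h0 : -(n : Int) ≤ x) (h1 : x < 0) :
    PySem.List.pyIdx? n x = PySem.List.pyIdx? n (x + n) := by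
  unfold PySem.List.pyIdx?
  rw [if_neg (by omega), if_pos (by omega), if_pos (by omega), if_pos (by omega)]
  congr 1
  omega

lemma pg_alias (p : List Int) (x d : Int) (h0 : -(p.length : Int) ≤ x) (h1 : x < 0) :
    PySem.List.pyGetD p x d = PySem.List.pyGetD p (x + p.length) d := by
  unfold PySem.List.pyGetD PySem.List.pyGet?
  rw [pyIdx_alias p.length x h0 h1]

lemma pset_alias (p : List Int) (x v : Int) (h0 : -(p.length : Int) ≤ x) (h1 : x < 0) :
    PySem.List.pySetD p x v = PySem.List.pySetD p (x + p.length) v := by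
  unfold PySem.List.pySetD PySem.List.pySet?
  rw [pyIdx_alias p.length x h0 h1]

lemma findA_len : ∀ (f : Nat) (p : List Int) (x : Int),
    (findA f p x).2.length = p.length := by
  intro f
  induction f with
  | zero => intro p x; rfl
  | succ f ih =>
    intro p x
    by_cases hpx : PySem.List.pyGetD p x 0 = x
    · simp [findA, hpx]
    · simp only [findA, if_pos hpx]
      rw [PySem.List.length_pySetD]
      exact ih p _

-- a negative in-range start behaves like its wrapped twin
lemma findA_neg (f : Nat) (hf : 1 ≤ f) (p : List Int) (x : Int) (hR : Rng p)
    (h0 : -(p.length : Int) ≤ x) (h1 : x < 0) :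
    findA (f + 1) p x = findA (f + 1) p (x + p.length) := by
  have hw0 : (0:Int) ≤ x + p.length := by omega
  have hwL : x + (p.length : Int) < p.length := by omega
  have hxh : PySem.List.pyGetD p x 0 = PySem.List.pyGetD p (x + p.length) 0 :=
    pg_alias p x 0 h0 h1
  have hvr := hR (x + p.length) hw0 hwL
  have hne : PySem.List.pyGetD p x 0 ≠ x := by rw [hxh]; omega
  by_cases hpx : PySem.List.pyGetD p (x + p.length) 0 = x + p.length
  · -- wrapped index is a root; the raw one takes one extra (no-op write) step
    obtain ⟨f', rfl⟩ : ∃ f', f = f' + 1 := ⟨f - 1, by omega⟩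
    simp only [findA, if_pos hne, if_neg (not_not_intro hpx)]
    rw [hxh, hpx]
    simp only [findA, if_neg (not_not_intro hpx)]
    rw [pset_alias p x _ h0 h1, PySem.List.pySetD_of_nonneg p (v := x + ↑p.length) hw0]
    have hlt : (x + (p.length:Int)).toNat < p.length := by omega
    have hgetl : p[(x + (p.length:Int)).toNat] = x + (p.length:Int) := by
      rw [← PySem.List.pyGetD_eq_getElem p 0 hw0 hwL]; exact hpx
    have hnoop : p.set (x + (p.length:Int)).toNat (x + (p.length:Int)) = p := by
      nth_rewrite 2 [← hgetl]
      exact List.set_getElem_self hlt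
    rw [hnoop]
  · have hne2 : PySem.List.pyGetD p x 0 ≠ x := hne
    simp only [findA, if_pos hne2, if_pos hpx]
    rw [hxh]
    have hlen := findA_len f p (PySem.List.pyGetD p (x + p.length) 0)
    rw [pset_alias _ x _ (by rw [hlen]; exact h0) h1, hlen]

-- ---- B's inner repaint loop is a map over the label array ----
lemma relabel_go : ∀ (k : Nat) (a : Int) (comp : List Int) (cu cv : Int),
    0 ≤ a → a + k = (comp.length : Int) →
    (PySem.List.pyRange a (comp.length : Int)).foldl
      (fun c i => if PySem.List.pyGetD c i 0 = cv then PySem.List.pySetD c i cu else c) comp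
    = comp.take a.toNat ++ (comp.drop a.toNat).map (fun x => if x = cv then cu else x) := by
  intro k
  induction k with
  | zero =>
    intro a comp cu cv ha0 hak
    rw [PySem.List.pyRange_one_eq_nil (by omega)]
    simp only [List.foldl_nil]
    have : a.toNat = comp.length := by omega
    rw [this]
    simp
  | succ k ih =>
    intro a comp cu cv ha0 hak
    have haL : a < (comp.length : Int) := by omega
    have hm : a.toNat < comp.length := by omega
    rw [PySem.List.pyRange_one_cons haL]
    simp only [List.foldl_cons]
    set v := comp[a.toNat] with hv
    have hpg : PySem.List.pyGetD comp a 0 = v := PySem.List.pyGetD_eq_getElem comp 0 ha0 haL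
    have hc1 : (if PySem.List.pyGetD comp a 0 = cv then PySem.List.pySetD comp a cu else comp)
        = comp.set a.toNat (if v = cv then cu else v) := by
      rw [hpg]
      by_cases hvc : v = cv
      · rw [if_pos hvc, if_pos hvc, PySem.List.pySetD_of_nonneg comp cu ha0]
      · rw [if_neg hvc, if_neg hvc, hv, List.set_getElem_self hm]
    rw [hc1]
    set c1 := comp.set a.toNat (if v = cv then cu else v) with hc1d
    have hlen1 : c1.length = comp.length := by simp [hc1d]
    have hrec := ih (a + 1) c1 cu cv (by omega) (by rw [hlen1]; omega)
    rw [hlen1] at hrec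
    rw [hrec]
    have hto : (a + 1).toNat = a.toNat + 1 := by omega
    rw [hto]
    -- identify prefix and suffix
    have htake : c1.take (a.toNat + 1) = comp.take a.toNat ++ [if v = cv then cu else v] := by
      rw [hc1d]
      rw [List.take_succ_eq_append_getElem (by simpa using hm)]
      rw [List.take_set_of_le (by omega)]
      congr 1
      rw [List.getElem_set_self (by simpa using hm)]
    have hdrop : c1.drop (a.toNat + 1) = comp.drop (a.toNat + 1) := by
      rw [hc1d, List.drop_set_of_lt (by omega)]
    have hmapdrop : (comp.drop a.toNat).map (fun x => if x = cv then cu else x)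
        = (if v = cv then cu else v) :: (comp.drop (a.toNat + 1)).map (fun x => if x = cv then cu else x) := by
      rw [List.drop_eq_getElem_cons hm, List.map_cons]
    rw [htake, hdrop, hmapdrop]
    simp [List.append_assoc]

lemma merge_eq_iff (a b x y : Int) (hab : a ≠ b) :
    ((if x = b then a else x) = (if y = b then a else y)) ↔
      (x = y ∨ (x = a ∧ y = b) ∨ (x = b ∧ y = a)) := by
  split_ifs <;> omega

-- two pointwise-equivalent labellings produce equally many distinct labels
lemma set_count_eq : ∀ (idxs : List Int) (F G : Int → Int) (sF sG : PySem.Set Int),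
    sF.length = sG.length →
    (∀ i ∈ idxs, (F i ∈ sF ↔ G i ∈ sG)) →
    (∀ i ∈ idxs, ∀ j ∈ idxs, (F i = F j ↔ G i = G j)) →
    (idxs.foldl (fun s i => PySem.Set.add s (F i)) sF).length
      = (idxs.foldl (fun s i => PySem.Set.add s (G i)) sG).length := by
  intro idxs
  induction idxs with
  | nil => intro F G sF sG hlen _ _; simpa using hlen
  | cons x rest ih =>
    intro F G sF sG hlen hmem heq
    simp only [List.foldl_cons]
    by_cases hFx : F x ∈ sF
    · have hGx : G x ∈ sG := (hmem x (by simp)).1 hFx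
      rw [PySem.Set.add_of_mem hFx, PySem.Set.add_of_mem hGx]
      exact ih F G sF sG hlen (fun i hi => hmem i (by simp [hi]))
        (fun i hi j hj => heq i (by simp [hi]) j (by simp [hj]))
    · have hGx : G x ∉ sG := fun hg => hFx ((hmem x (by simp)).2 hg)
      rw [PySem.Set.add_of_not_mem hFx, PySem.Set.add_of_not_mem hGx]
      refine ih F G _ _ (by simp [hlen]) ?_
        (fun i hi j hj => heq i (by simp [hi]) j (by simp [hj]))
      intro i hi
      have h1 := hmem i (by simp [hi])
      have h2 := heq i (by simp [hi]) x (by simp)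
      simp only [List.mem_append, List.mem_singleton]
      constructor
      · rintro (h | h)
        · exact Or.inl (h1.1 h)
        · exact Or.inr (h2.1 h)
      · rintro (h | h)
        · exact Or.inl (h1.2 h)
        · exact Or.inr (h2.2 h)


-- ---- convenience facts ----
lemma rt_eq_of_some {p : List Int} {i r : Int}
    (h : rootA (p.length + 1) p i = some r) : rt p i = r := by
  simp [rt, h]

lemma som_some {p : List Int} (hS : Som p) {i : Int}
    (hi0 : 0 ≤ i) (hiL : i < (p.length : Int)) :
    rootA (p.length + 1) p i = some (rt p i) := by
  obtain ⟨r, hr⟩ := Option.isSome_iff_exists.1 (hS i hi0 hiL)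
  rw [hr, rt_eq_of_some hr]

lemma rt_pres {p q : List Int} (hlen : q.length = p.length) (hS : Som p)
    (hpres : ∀ (g : Nat) (i s : Int), 0 ≤ i → i < (p.length : Int) →
      rootA g p i = some s → rootA g q i = some s)
    {i : Int} (hi0 : 0 ≤ i) (hiL : i < (p.length : Int)) :
    rootA (q.length + 1) q i = some (rt p i) ∧ rt q i = rt p i := by
  have h1 := hpres (p.length + 1) i (rt p i) hi0 hiL (som_some hS hi0 hiL)
  rw [← hlen] at h1
  exact ⟨h1, rt_eq_of_some h1⟩

lemma som_of_pres {p q : List Int} (hlen : q.length = p.length) (hS : Som p)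
    (hpres : ∀ (g : Nat) (i s : Int), 0 ≤ i → i < (p.length : Int) →
      rootA g p i = some s → rootA g q i = some s) : Som q := by
  intro i hi0 hiL
  rw [hlen] at hiL
  rw [(rt_pres hlen hS hpres hi0 hiL).1]
  rfl

lemma pg_map (comp : List Int) (f : Int → Int) {i : Int}
    (hi0 : 0 ≤ i) (hiL : i < (comp.length : Int)) :
    PySem.List.pyGetD (comp.map f) i 0 = f (PySem.List.pyGetD comp i 0) := by
  rw [PySem.List.pyGetD_eq_getElem comp 0 hi0 hiL,
      PySem.List.pyGetD_eq_getElem (comp.map f) 0 hi0 (by simpa using hiL)]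
  simp

lemma part_transfer (Ai Aj Ci Cj pu pv cu cv a b : Int)
    (hij : (Ai = Aj) ↔ (Ci = Cj)) (hiu : (Ai = pu) ↔ (Ci = cu)) (hju : (Aj = pu) ↔ (Cj = cu))
    (hiv : (Ai = pv) ↔ (Ci = cv)) (hjv : (Aj = pv) ↔ (Cj = cv))
    (hab : (a = pu ∧ b = pv) ∨ (a = pv ∧ b = pu)) :
    ((Ai = Aj ∨ (Ai = a ∧ Aj = b) ∨ (Ai = b ∧ Aj = a)) ↔
      (Ci = Cj ∨ (Ci = cu ∧ Cj = cv) ∨ (Ci = cv ∧ Cj = cu))) := by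
  rcases hab with ⟨rfl, rfl⟩ | ⟨rfl, rfl⟩ <;> rw [hij, hiu, hju, hiv, hjv] <;> tauto

-- ---- the loop invariant ----
def LoopInv (n : Int) (p comp : List Int) : Prop :=
  p.length = n.toNat ∧ comp.length = n.toNat ∧ Rng p ∧ Som p ∧
  ∀ i j : Int, 0 ≤ i → i < (p.length : Int) → 0 ≤ j → j < (p.length : Int) →
    (rt p i = rt p j ↔ PySem.List.pyGetD comp i 0 = PySem.List.pyGetD comp j 0)

set_option maxHeartbeats 1000000 in
lemma step_inv (n : Int) (p rk comp : List Int) (e : List Int)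
    (hI : LoopInv n p comp) (hn : 1 ≤ n)
    (hlen2 : e.length = 2) (hxs : ∀ x ∈ e, -n ≤ x ∧ x < n) :
    LoopInv n (stepA (p, rk) e).1 (stepB n comp e) := by
  obtain ⟨u, v, rfl⟩ : ∃ u v, e = [u, v] := by
    match e, hlen2 with | [u, v], _ => exact ⟨u, v, rfl⟩
  obtain ⟨hpl, hcl, hR, hS, hpart⟩ := hI
  have hnL : ((p.length : Int)) = n := by omega
  have hnC : ((comp.length : Int)) = n := by omega
  have hu := hxs u (by simp)
  have hv := hxs v (by simp)
  set uN := if u < 0 then u + n else u with huNd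
  set vN := if v < 0 then v + n else v with hvNd
  have huNb : 0 ≤ uN ∧ uN < n := by rw [huNd]; split <;> omega
  have hvNb : 0 ≤ vN ∧ vN < n := by rw [hvNd]; split <;> omega
  -- A: first find, normalized
  have hfindu : findA (p.length + 1) p u = findA (p.length + 1) p uN := by
    rw [huNd]
    split
    · have := findA_neg p.length (by omega) p u hR (by omega) (by assumption)
      rw [this, hnL]
    · rfl
  have hgo1 := find_go (p.length + 1) p uN (rt p uN) hR huNb.1 (by omega)
    (som_some hS huNb.1 (by omega))
  set p1 := (findA (p.length + 1) p uN).2 with hp1d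
  obtain ⟨hval1, hlen1, hR1, hpres1⟩ := hgo1
  have hS1 : Som p1 := som_of_pres hlen1 hS hpres1
  -- A: second find (on p1), normalized
  have hfindv : findA (p1.length + 1) p1 v = findA (p1.length + 1) p1 vN := by
    rw [hvNd]
    split
    · have := findA_neg p1.length (by omega) p1 v hR1
        (by rw [hlen1, hnL]; omega) (by assumption)
      rw [this, hlen1, hnL]
    · rfl
  have hrtv1 := rt_pres hlen1 hS hpres1 hvNb.1 (by omega)
  have hgo2 := find_go (p1.length + 1) p1 vN (rt p vN) hR1 hvNb.1
    (by rw [hlen1]; omega) (by rw [← hrtv1.2]; exact som_some hS1 hvNb.1 (by rw [hlen1]; omega))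
  set p2 := (findA (p1.length + 1) p1 vN).2 with hp2d
  obtain ⟨hval2, hlen2', hR2, hpres2⟩ := hgo2
  have hS2 : Som p2 := som_of_pres hlen2' hS1 (fun g i s hi0 hiL h => hpres2 g i s hi0 hiL h)
  have hlen2p : p2.length = p.length := by rw [hlen2', hlen1]
  -- roots in p2 coincide with roots in p
  have hpres12 : ∀ (g : Nat) (i s : Int), 0 ≤ i → i < (p.length : Int) →
      rootA g p i = some s → rootA g p2 i = some s := by
    intro g i s hi0 hiL h
    exact hpres2 g i s hi0 (by rw [hlen1]; exact hiL) (hpres1 g i s hi0 hiL h)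
  have hrt2 : ∀ i : Int, 0 ≤ i → i < (p.length : Int) → rt p2 i = rt p i :=
    fun i hi0 hiL => (rt_pres hlen2p hS hpres12 hi0 hiL).2
  set pu := rt p uN with hpud
  set pv := rt p vN with hpvd
  have hpub : 0 ≤ pu ∧ pu < (p.length : Int) :=
    rootA_range _ p uN pu hR huNb.1 (by omega) (som_some hS huNb.1 (by omega))
  have hpvb : 0 ≤ pv ∧ pv < (p.length : Int) :=
    rootA_range _ p vN pv hR hvNb.1 (by omega) (som_some hS hvNb.1 (by omega))
  -- B side values
  set cu := PySem.List.pyGetD comp u 0 with hcud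
  set cv := PySem.List.pyGetD comp v 0 with hcvd
  have hcu : cu = PySem.List.pyGetD comp uN 0 := by
    rw [hcud, huNd]
    split
    · rw [pg_alias comp u 0 (by omega) (by assumption), hnC]
    · rfl
  have hcv : cv = PySem.List.pyGetD comp vN 0 := by
    rw [hcvd, hvNd]
    split
    · rw [pg_alias comp v 0 (by omega) (by assumption), hnC]
    · rfl
  have hguard : pu = pv ↔ cu = cv := by
    rw [hcu, hcv, hpud, hpvd]
    exact hpart uN vN huNb.1 (by omega) hvNb.1 (by omega)
  -- correspondences used for the merged partition
  have hcorr_u : ∀ i : Int, 0 ≤ i → i < (p.length : Int) →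
      (rt p i = pu ↔ PySem.List.pyGetD comp i 0 = cu) := by
    intro i hi0 hiL
    rw [hcu, hpud]
    exact hpart i uN hi0 hiL huNb.1 (by omega)
  have hcorr_v : ∀ i : Int, 0 ≤ i → i < (p.length : Int) →
      (rt p i = pv ↔ PySem.List.pyGetD comp i 0 = cv) := by
    intro i hi0 hiL
    rw [hcv, hpvd]
    exact hpart i vN hi0 hiL hvNb.1 (by omega)
  -- unfold the two step functions
  have hstepA : stepA (p, rk) [u, v] =
      (if pu = pv then (p2, rk)
       else if PySem.List.pyGetD rk pu 0 ≤ PySem.List.pyGetD rk pv 0 then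
        (PySem.List.pySetD p2 pv pu,
         PySem.List.pySetD rk pu (PySem.List.pyGetD rk pu 0 + PySem.List.pyGetD rk pv 0))
       else
        (PySem.List.pySetD p2 pu pv,
         PySem.List.pySetD rk pv (PySem.List.pyGetD rk pv 0 + PySem.List.pyGetD rk pv 0))) := by
    simp only [stepA]
    rw [hfindu, hval1, ← hp1d, hfindv, hval2, ← hp2d]
  have hstepB : stepB n comp [u, v] =
      (if cu = cv then comp else comp.map (fun x => if x = cv then cu else x)) := by
    simp only [stepB, ← hcud, ← hcvd]
    by_cases hcc : cu = cv
    · rw [if_neg (not_not_intro hcc), if_pos hcc]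
    · rw [if_pos hcc, if_neg hcc, ← hnC]
      have := relabel_go comp.length 0 comp cu cv (by omega) (by omega)
      simpa using this
  rw [hstepA, hstepB]
  by_cases hpv : pu = pv
  · rw [if_pos hpv, if_pos (hguard.1 hpv)]
    refine ⟨by rw [hlen2p]; omega, hcl, hR2, hS2, ?_⟩
    intro i j hi0 hiL hj0 hjL
    rw [hlen2p] at hiL hjL
    rw [hrt2 i hi0 hiL, hrt2 j hj0 hjL]
    exact hpart i j hi0 hiL hj0 hjL
  · have hcuv : cu ≠ cv := fun h => hpv (hguard.2 h)
    rw [if_neg hpv, if_neg hcuv]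
    have hpu_root : PySem.List.pyGetD p2 pu 0 = pu :=
      rootA_root _ p2 uN pu ((rt_pres hlen2p hS hpres12 huNb.1 (by omega)).1)
    have hpv_root : PySem.List.pyGetD p2 pv 0 = pv :=
      rootA_root _ p2 vN pv ((rt_pres hlen2p hS hpres12 hvNb.1 (by omega)).1)
    have key : ∀ a b : Int, ((a = pu ∧ b = pv) ∨ (a = pv ∧ b = pu)) →
        LoopInv n (PySem.List.pySetD p2 b a) (comp.map (fun x => if x = cv then cu else x)) := by
      intro a b hab
      have hab' : a ≠ b := by rcases hab with ⟨rfl, rfl⟩ | ⟨rfl, rfl⟩ <;> omega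
      have ha0 : 0 ≤ a := by rcases hab with ⟨rfl, _⟩ | ⟨rfl, _⟩; exacts [hpub.1, hpvb.1]
      have haL : a < (p.length : Int) := by rcases hab with ⟨rfl, _⟩ | ⟨rfl, _⟩; exacts [hpub.2, hpvb.2]
      have hb0 : 0 ≤ b := by rcases hab with ⟨_, rfl⟩ | ⟨_, rfl⟩; exacts [hpvb.1, hpub.1]
      have hbL : b < (p.length : Int) := by rcases hab with ⟨_, rfl⟩ | ⟨_, rfl⟩; exacts [hpvb.2, hpub.2]
      have ha_root : PySem.List.pyGetD p2 a 0 = a := by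
        rcases hab with ⟨rfl, _⟩ | ⟨rfl, _⟩; exacts [hpu_root, hpv_root]
      have hb_root : PySem.List.pyGetD p2 b 0 = b := by
        rcases hab with ⟨_, rfl⟩ | ⟨_, rfl⟩; exacts [hpv_root, hpu_root]
      set p3 := PySem.List.pySetD p2 b a with hp3d
      have hlen3 : p3.length = p.length := by rw [hp3d, PySem.List.length_pySetD, hlen2p]
      have hrt3 : ∀ i : Int, 0 ≤ i → i < (p.length : Int) →
          rootA (p3.length + 1) p3 i = some (if rt p i = b then a else rt p i) := by
        intro i hi0 hiL
        have hsome2 : rootA (p2.length + 1) p2 i = some (rt p i) :=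
          (rt_pres hlen2p hS hpres12 hi0 hiL).1
        rw [hlen3]
        by_cases hib : rt p i = b
        · rw [if_pos hib]
          rw [hib] at hsome2
          have hfl : rootA p2.length p2 i = some b :=
            rootA_fuel_len _ p2 i b hR2 hi0 (by rw [hlen2p]; exact hiL) hsome2
          have := union_move p2 a b hR2 ha0 (by rw [hlen2p]; exact haL)
            hb0 (by rw [hlen2p]; exact hbL) ha_root hab'
            p2.length i hi0 (by rw [hlen2p]; exact hiL) hfl
          rw [← hlen2p]
          exact this
        · rw [if_neg hib]
          rw [← hlen2p]
          exact union_keep p2 a b hR2 hb0 (by rw [hlen2p]; exact hbL)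
            hb_root (p2.length + 1) i (rt p i) hi0 (by rw [hlen2p]; exact hiL) hsome2 hib
      have hrt3v : ∀ i : Int, 0 ≤ i → i < (p.length : Int) →
          rt p3 i = if rt p i = b then a else rt p i := by
        intro i hi0 hiL
        exact rt_eq_of_some (hrt3 i hi0 hiL)
      refine ⟨by rw [hlen3]; omega, by simp [hcl], ?_, ?_, ?_⟩
      · -- Rng p3
        intro i hi0 hiL
        rw [hlen3] at hiL ⊢
        rw [hp3d, pg_set a hb0 (by rw [hlen2p]; exact hbL) hi0]
        split
        · exact ⟨ha0, haL⟩
        · have := hR2 i hi0 (by rw [hlen2p]; exact hiL)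
          rw [hlen2p] at this
          exact this
      · -- Som p3
        intro i hi0 hiL
        rw [hlen3] at hiL
        rw [hrt3 i hi0 hiL]
        rfl
      · -- merged partition
        intro i j hi0 hiL hj0 hjL
        rw [hlen3] at hiL hjL
        rw [hrt3v i hi0 hiL, hrt3v j hj0 hjL]
        rw [pg_map comp _ hi0 (by omega), pg_map comp _ hj0 (by omega)]
        rw [merge_eq_iff a b _ _ hab', merge_eq_iff cu cv _ _ hcuv]
        have hij := hpart i j hi0 hiL hj0 hjL
        have hiu := hcorr_u i hi0 hiL
        have hju := hcorr_u j hj0 hjL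
        have hiv := hcorr_v i hi0 hiL
        have hjv := hcorr_v j hj0 hjL
        exact part_transfer _ _ _ _ pu pv cu cv a b hij hiu hju hiv hjv hab
    split_ifs with hrk
    · exact key pu pv (Or.inl ⟨rfl, rfl⟩)
    · exact key pv pu (Or.inr ⟨rfl, rfl⟩)

lemma loop_inv (n : Int) : ∀ (conns : List (List Int)) (p rk comp : List Int),
    LoopInv n p comp → 1 ≤ n →
    (∀ e ∈ conns, e.length = 2 ∧ ∀ x ∈ e, -n ≤ x ∧ x < n) →
    LoopInv n (conns.foldl stepA (p, rk)).1 (conns.foldl (stepB n) comp) := by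
  intro conns
  induction conns with
  | nil => intro p rk comp hI _ _; exact hI
  | cons e rest ih =>
    intro p rk comp hI hn hok
    simp only [List.foldl_cons]
    have hstep := step_inv n p rk comp e hI hn (hok e (by simp)).1 (hok e (by simp)).2
    have := ih (stepA (p, rk) e).1 (stepA (p, rk) e).2 (stepB n comp e) hstep hn
      (fun e' he' => hok e' (by simp [he']))
    simpa using this

lemma count_go : ∀ (idxs : List Int) (s : PySem.Set Int) (p : List Int), Rng p → Som p →
    (∀ i ∈ idxs, 0 ≤ i ∧ i < (p.length : Int)) →
    (idxs.foldl countStep (s, p)).1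
      = idxs.foldl (fun acc i => PySem.Set.add acc (rt p i)) s := by
  intro idxs
  induction idxs with
  | nil => intro s p _ _ _; rfl
  | cons x rest ih =>
    intro s p hR hS hb
    have hx := hb x (by simp)
    have hgo := find_go (p.length + 1) p x (rt p x) hR hx.1 hx.2 (som_some hS hx.1 hx.2)
    obtain ⟨hval, hlen, hRq, hpres⟩ := hgo
    set p1 := (findA (p.length + 1) p x).2 with hp1d
    have hS1 : Som p1 := som_of_pres hlen hS hpres
    simp only [List.foldl_cons]
    have hcs : countStep (s, p) x = (PySem.Set.add s (rt p x), p1) := by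
      simp only [countStep, hval, hp1d]
    rw [hcs]
    rw [ih (PySem.Set.add s (rt p x)) p1 hRq hS1
      (fun i hi => by rw [hlen]; exact hb i (by simp [hi]))]
    refine PySem.List.foldl_congr_mem rest _ _ _ ?_
    intro acc i hi
    have hib := hb i (by simp [hi])
    rw [(rt_pres hlen hS hpres hib.1 hib.2).2]

lemma pg_range (n i : Int) (hi0 : 0 ≤ i) (hiL : i < n) :
    PySem.List.pyGetD (PySem.List.pyRange 0 n) i 0 = i := by
  have hlen : (PySem.List.pyRange 0 n).length = n.toNat := by
    rw [PySem.List.length_pyRange_one]; omega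
  rw [PySem.List.pyGetD_eq_getElem _ 0 hi0 (by rw [hlen]; omega)]
  rw [PySem.List.getElem_pyRange_one]
  omega

lemma init_inv (n : Int) (hn : 1 ≤ n) :
    LoopInv n (PySem.List.pyRange 0 n) (PySem.List.pyRange 0 n) := by
  have hlen : (PySem.List.pyRange 0 n).length = n.toNat := by
    rw [PySem.List.length_pyRange_one]; omega
  have hL : ((PySem.List.pyRange 0 n).length : Int) = n := by omega
  have hRg : Rng (PySem.List.pyRange 0 n) := by
    intro i hi0 hiL
    rw [hL] at hiL ⊢
    rw [pg_range n i hi0 hiL]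
    omega
  have hrt : ∀ i : Int, 0 ≤ i → i < n → rt (PySem.List.pyRange 0 n) i = i := by
    intro i hi0 hiL
    exact rt_eq_of_some (rootA_self (pg_range n i hi0 hiL) (by omega))
  refine ⟨hlen, hlen, hRg, ?_, ?_⟩
  · intro i hi0 hiL
    rw [hL] at hiL
    rw [rootA_self (pg_range n i hi0 hiL) (by omega)]
    rfl
  · intro i j hi0 hiL hj0 hjL
    rw [hL] at hiL hjL
    rw [hrt i hi0 hiL, hrt j hj0 hjL, pg_range n i hi0 hiL, pg_range n j hj0 hjL]

theorem makeConnected_spec : Claim_equal_makeConnected := by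
  intro n conns hDom hPre
  unfold Spec_makeConnected
  by_cases hg : ((conns.length : Int)) < n - 1
  · simp only [makeConnected, makeConnected_alt, if_pos hg]
  · have hedges : ∀ e ∈ conns, e.length = 2 ∧ ∀ x ∈ e, -n ≤ x ∧ x < n :=
      hPre.resolve_left hg
    simp only [makeConnected, makeConnected_alt, if_neg hg]
    by_cases hn1 : n ≤ 0
    · -- no valid endpoints exist, so connections is empty and both sides count nothing
      have hnil : conns = [] := by
        cases conns with
        | nil => rfl
        | cons e t =>
          exfalso
          obtain ⟨hl2, hxs⟩ := hedges e (by simp)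
          cases e with
          | nil => simp at hl2
          | cons x xs =>
            have := hxs x (by simp)
            omega
      subst hnil
      rw [PySem.List.pyRange_one_eq_nil (by omega)]
      simp [countStep, PySem.Set.len, PySem.Set.ofList, PySem.Set.empty]
    · have hn : 1 ≤ n := by omega
      have hI := loop_inv n conns (PySem.List.pyRange 0 n) (List.replicate n.toNat 1)
        (PySem.List.pyRange 0 n) (init_inv n hn) hn hedges
      set pF := (conns.foldl stepA (PySem.List.pyRange 0 n, List.replicate n.toNat 1)).1 with hpFd
      set compF := conns.foldl (stepB n) (PySem.List.pyRange 0 n) with hcompFd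
      obtain ⟨hplF, hclF, hRF, hSF, hpartF⟩ := hI
      have hpLi : ((pF.length : Int)) = n := by omega
      have hcLi : ((compF.length : Int)) = n := by omega
      rw [count_go (PySem.List.pyRange 0 n) PySem.Set.empty pF hRF hSF
        (fun i hi => by rw [hpLi]; exact (PySem.List.mem_pyRange_one.1 hi).imp id (fun h => h))]
      rw [PySem.Set.ofList_eq_foldl]
      have hmap : compF = (PySem.List.pyRange 0 n).map (fun j => PySem.List.pyGetD compF j 0) := by
        conv_lhs => rw [← PySem.List.map_pyGetD_pyRange_zero' compF 0]
        rw [hcLi]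
      rw [hmap, List.foldl_map]
      have hcnt := set_count_eq (PySem.List.pyRange 0 n) (fun i => rt pF i)
        (fun i => PySem.List.pyGetD compF i 0) PySem.Set.empty PySem.Set.empty rfl
        (fun i _ => by simp [PySem.Set.empty])
        (fun i hi j hj => by
          have hib := PySem.List.mem_pyRange_one.1 hi
          have hjb := PySem.List.mem_pyRange_one.1 hj
          exact hpartF i j hib.1 (by omega) hjb.1 (by omega))
      simp only [PySem.Set.len]
      rw [hcnt]
      rfl
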